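-- pv_equiv track=rewrite | github.com/swantechindia/swanva | va_manager/services/report_service.py | compute_severity_counts
-- ===== SOURCE A (Python) =====
-- from collections.abc import Mapping
--
-- SeverityCounts = dict[str, int]
--
-- def compute_severity_counts(findings: list[Mapping[str, object]]) -> SeverityCounts:
--     """Compute count of vulnerabilities by severity level.
--
--     Args:
--         findings: List of vulnerability findings.
--
--     Returns:
--         Dictionary with counts for critical, high, medium, low severity levels.
--     """
--
--     counts = {"critical": 0, "high": 0, "medium": 0, "low": 0}
--
--     seen_cves = set()
--     for finding in findings:
--         cve = finding.get("cve", "unknown")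
--         # Count each CVE only once, even if it appears on multiple ports
--         if cve not in seen_cves:
--             severity = finding.get("severity", "low").lower()
--             if severity in counts:
--                 counts[severity] += 1
--             seen_cves.add(cve)
--
--     return counts
-- ===== SOURCE B (Python) =====
-- def compute_severity_counts(findings):
--     """Dedupe-then-count: project findings to (cve, severity) pairs, keep the
--     severity of each CVE's first occurrence (prefix-membership dedupe), then
--     count each fixed bucket directly with list.count."""
--     pairs = [(f.get("cve", "unknown"), f.get("severity", "low").lower()) for f in findings]
--     firsts = [p[0] for p in pairs]
--     sevs = [s for i, (c, s) in enumerate(pairs) if c not in firsts[:i]]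
--     return {s: sevs.count(s) for s in ("critical", "high", "medium", "low")}
-- ===== Notes on version B (the rewrite author's own statement) =====
-- stated objective: alternative
-- what changed: B replaces A's single stateful pass (seen-set plus in-place bucket increments) by a dedupe-then-count pipeline: map to (cve, severity) pairs, filter to first occurrences by prefix membership, then compute each of the four bucket counts independently with list.count instead of any incremented counter.
import Mathlib
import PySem

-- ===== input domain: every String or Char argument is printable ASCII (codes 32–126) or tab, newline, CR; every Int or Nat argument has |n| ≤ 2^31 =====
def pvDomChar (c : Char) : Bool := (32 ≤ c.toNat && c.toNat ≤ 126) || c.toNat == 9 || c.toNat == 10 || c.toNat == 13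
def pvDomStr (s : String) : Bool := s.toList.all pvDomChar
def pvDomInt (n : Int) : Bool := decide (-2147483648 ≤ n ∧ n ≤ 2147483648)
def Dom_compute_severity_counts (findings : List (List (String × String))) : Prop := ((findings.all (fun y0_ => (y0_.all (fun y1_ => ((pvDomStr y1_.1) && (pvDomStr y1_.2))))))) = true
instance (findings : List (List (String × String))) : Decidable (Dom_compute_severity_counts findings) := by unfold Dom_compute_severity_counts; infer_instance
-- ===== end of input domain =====

-- B is an alternative pipeline: project to (cve, severity) pairs, dedupe by prefix membership, count each bucket with list.count.

-- ===== PORT A =====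
-- finding.get(key, dflt) on the assoc-list finding
def cscGet (finding : List (String × String)) (key dflt : String) : String :=
  (PySem.Dict.mk finding).getD key dflt

-- A's 'if severity in counts: counts[severity] += 1'
def cscStep (counts : PySem.Dict String Int) (sev : String) : PySem.Dict String Int :=
  if counts.contains sev then counts.modify sev 0 (· + 1) else counts

def cscInit : PySem.Dict String Int :=
  PySem.Dict.mk [("critical", 0), ("high", 0), ("medium", 0), ("low", 0)]

-- A's single loop: seen-set of CVEs, counts incremented in place
def cscLoopA : List (List (String × String)) → PySem.Dict String Int → PySem.Set String → PySem.Dict String Int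
  | [], counts, _ => counts
  | f :: rest, counts, seen =>
    let cve := cscGet f "cve" "unknown"
    if PySem.Set.contains seen cve then
      cscLoopA rest counts seen
    else
      let sev := PySem.Str.lower (cscGet f "severity" "low")
      cscLoopA rest (cscStep counts sev) (PySem.Set.add seen cve)

def compute_severity_counts (findings : List (List (String × String))) : List (String × Int) :=
  (cscLoopA findings cscInit PySem.Set.empty).items

-- ===== PORT B =====
-- pairs = [(f.get("cve","unknown"), f.get("severity","low").lower()) for f in findings]
def cscPairs (findings : List (List (String × String))) : List (String × String) :=
  findings.map (fun f => (cscGet f "cve" "unknown", PySem.Str.lower (cscGet f "severity" "low")))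

-- [s for i, (c, s) in enumerate(pairs) if c not in firsts[:i]]  — the recursion carries the
-- prefix firsts[:i] of first components explicitly
def cscSevs : List String → List (String × String) → List String
  | _, [] => []
  | pre, (c, s) :: rest =>
    if pre.contains c then cscSevs (pre ++ [c]) rest
    else s :: cscSevs (pre ++ [c]) rest

def compute_severity_counts_alt (findings : List (List (String × String))) : List (String × Int) :=
  let sevs := cscSevs [] (cscPairs findings)
  [("critical", (sevs.count "critical" : Int)), ("high", (sevs.count "high" : Int)),
   ("medium", (sevs.count "medium" : Int)), ("low", (sevs.count "low" : Int))]

-- ===== PRECONDITION & SPEC =====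
def Spec_compute_severity_counts (findings : List (List (String × String))) (out : List (String × Int)) : Prop := out = compute_severity_counts_alt findings
instance (findings : List (List (String × String))) (out : List (String × Int)) : Decidable (Spec_compute_severity_counts findings out) := by unfold Spec_compute_severity_counts; infer_instance

-- ===== CLAIM (what is proved, stated in full; the proofs are below) =====
def Claim_equal_compute_severity_counts : Prop := ∀ (findings : List (List (String × String))), Dom_compute_severity_counts findings → Spec_compute_severity_counts findings (compute_severity_counts findings)

-- ===== LEMMAS AND PROOFS =====

-- a 4-bucket dict with arbitrary values
def cscMk4 (a b c d : Int) : PySem.Dict String Int :=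
  PySem.Dict.mk [("critical", a), ("high", b), ("medium", c), ("low", d)]

lemma cscStep_mk4 (a b c d : Int) (s : String) :
    cscStep (cscMk4 a b c d) s =
      if s = "critical" then cscMk4 (a + 1) b c d
      else if s = "high" then cscMk4 a (b + 1) c d
      else if s = "medium" then cscMk4 a b (c + 1) d
      else if s = "low" then cscMk4 a b c (d + 1)
      else cscMk4 a b c d := by
  by_cases h1 : s = "critical"
  · subst h1; rfl
  by_cases h2 : s = "high"
  · subst h2; rfl
  by_cases h3 : s = "medium"
  · subst h3; rfl
  by_cases h4 : s = "low"
  · subst h4; rfl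
  simp only [if_neg h1, if_neg h2, if_neg h3, if_neg h4]
  simp only [cscStep, cscMk4, PySem.Dict.contains]
  rw [if_neg]
  simp
  exact ⟨fun h => h1 h.symm, fun h => h2 h.symm, fun h => h3 h.symm, fun h => h4 h.symm⟩

-- folding the bucket-increment over a list adds each bucket's count
lemma csc_fold_mk4 : ∀ (l : List String) (a b c d : Int),
    l.foldl cscStep (cscMk4 a b c d) =
      cscMk4 (a + l.count "critical") (b + l.count "high") (c + l.count "medium") (d + l.count "low") := by
  intro l
  induction l with
  | nil => intro a b c d; simp
  | cons s l ih =>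
    intro a b c d
    simp only [List.foldl_cons, cscStep_mk4, List.count_cons]
    by_cases h1 : s = "critical"
    · subst h1; rw [if_pos rfl, ih]; simp [cscMk4]; omega
    rw [if_neg h1]
    by_cases h2 : s = "high"
    · subst h2; rw [if_pos rfl, ih]; simp [cscMk4]; omega
    rw [if_neg h2]
    by_cases h3 : s = "medium"
    · subst h3; rw [if_pos rfl, ih]; simp [cscMk4]; omega
    rw [if_neg h3]
    by_cases h4 : s = "low"
    · subst h4; rw [if_pos rfl, ih]; simp [cscMk4]; omega
    rw [if_neg h4, ih]
    simp [h1, h2, h3, h4]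

-- A's loop equals folding the increment over B's deduped severity list, under the
-- invariant that the seen-set and the prefix list agree on membership
lemma csc_loop_eq : ∀ (rest : List (List (String × String))) (pre : List String)
    (seen : PySem.Set String) (counts : PySem.Dict String Int),
    (∀ c, PySem.Set.contains seen c = pre.contains c) →
    cscLoopA rest counts seen = (cscSevs pre (cscPairs rest)).foldl cscStep counts := by
  intro rest
  induction rest with
  | nil => intro pre seen counts _; rfl
  | cons f rest ih =>
    intro pre seen counts hinv
    simp only [cscLoopA, cscPairs, List.map_cons, cscSevs, hinv]
    by_cases h : pre.contains (cscGet f "cve" "unknown") = true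
    · simp only [h, if_true]
      refine (ih (pre ++ [cscGet f "cve" "unknown"]) seen counts ?_).trans ?_
      · intro c
        rw [hinv c, List.contains_append]
        cases hc : (pre.contains c)
        · simp only [Bool.false_or, List.contains_cons, List.contains_nil, Bool.or_false]
          cases hbeq : (c == cscGet f "cve" "unknown")
          · rfl
          · exact absurd (eq_of_beq hbeq ▸ hc) (by rw [h]; simp)
        · rfl
      · simp [cscPairs]
    · have h' : pre.contains (cscGet f "cve" "unknown") = false := by simpa using h
      simp only [h', Bool.false_eq_true, if_false, List.foldl_cons]
      refine (ih (pre ++ [cscGet f "cve" "unknown"]) (PySem.Set.add seen (cscGet f "cve" "unknown"))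
        (cscStep counts (PySem.Str.lower (cscGet f "severity" "low"))) ?_).trans (by simp [cscPairs])
      intro c
      have hns : cscGet f "cve" "unknown" ∉ seen := by
        rw [← PySem.Set.contains_iff, hinv]; simpa using h' 
      rw [PySem.Set.add_eq_ite, if_neg hns, List.contains_append]
      simp only [PySem.Set.contains_eq_listContains, List.contains_append] at hinv ⊢
      rw [hinv c]

-- ===== VERDICT (by name: the statement is the Claim_ definition above) =====
theorem compute_severity_counts_spec : Claim_equal_compute_severity_counts := by
  intro findings _
  unfold Spec_compute_severity_counts compute_severity_counts compute_severity_counts_alt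
  rw [csc_loop_eq findings [] PySem.Set.empty cscInit (by intro c; rfl)]
  show ((cscSevs [] (cscPairs findings)).foldl cscStep (cscMk4 0 0 0 0)).items = _
  rw [csc_fold_mk4]
  simp [cscMk4]
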